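-- pv_equiv track=rewrite | github.com/mltrinhammer/openpsytslm | src/get_data/extract_aus_from_stream_files.py | get_au_indices
-- ===== SOURCE A (Python) =====
-- def get_au_indices(columns):
--     """Find the indices of frame, timestamp, and AU columns ending with _r (regression values)"""
--     indices = []
--     names = []
--
--     # Add frame and timestamp first
--     for idx, col in enumerate(columns):
--         if col == 'frame' or col == 'timestamp':
--             indices.append(idx)
--             names.append(col)
--
--     # Then add AU columns
--     for idx, col in enumerate(columns):
--         if col.startswith('AU') and col.endswith('_r'):
--             indices.append(idx)
--             names.append(col)
--
--     return indices, names
-- ===== SOURCE B (Python) =====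
-- def get_au_indices(columns):
--     """Find the indices of frame, timestamp, and AU columns ending with _r (regression values)"""
--     meta_idx, meta_names, au_idx, au_names = [], [], [], []
--     for idx, col in enumerate(columns):
--         if col == 'frame' or col == 'timestamp':
--             meta_idx.append(idx)
--             meta_names.append(col)
--         elif col.startswith('AU') and col.endswith('_r'):
--             au_idx.append(idx)
--             au_names.append(col)
--     return meta_idx + au_idx, meta_names + au_names
-- ===== Notes on version B (the rewrite author's own statement) =====
-- stated objective: alternative
-- what changed: Replaces A's two full scans of enumerate(columns) with a single pass that partitions matches into a frame/timestamp bucket and an AU bucket (mutually exclusive via elif), concatenated at the end.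
import Mathlib
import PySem

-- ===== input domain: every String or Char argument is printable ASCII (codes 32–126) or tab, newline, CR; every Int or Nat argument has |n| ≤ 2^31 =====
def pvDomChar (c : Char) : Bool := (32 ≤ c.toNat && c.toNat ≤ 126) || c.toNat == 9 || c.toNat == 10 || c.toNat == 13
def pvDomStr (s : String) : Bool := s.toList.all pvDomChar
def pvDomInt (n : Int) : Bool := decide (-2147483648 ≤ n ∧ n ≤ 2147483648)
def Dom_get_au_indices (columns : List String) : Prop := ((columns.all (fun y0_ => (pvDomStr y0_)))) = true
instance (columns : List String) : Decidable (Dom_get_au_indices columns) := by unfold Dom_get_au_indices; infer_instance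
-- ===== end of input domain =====

-- B makes one pass partitioning matches into two buckets instead of A's two full scans (same asymptotic cost); same results.

-- ===== PORT A =====
def get_au_indices (columns : List String) : List Int × List String :=
  -- Add frame and timestamp first
  let st1 := (PySem.List.enumerate columns).foldl
    (fun (acc : List Int × List String) p =>
      if p.2 == "frame" || p.2 == "timestamp" then (acc.1 ++ [p.1], acc.2 ++ [p.2]) else acc)
    ([], [])
  -- Then add AU columns
  let st2 := (PySem.List.enumerate columns).foldl
    (fun (acc : List Int × List String) p =>
      if PySem.Str.startswith p.2 "AU" && PySem.Str.endswith p.2 "_r" then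
        (acc.1 ++ [p.1], acc.2 ++ [p.2])
      else acc)
    st1
  st2

-- ===== PORT B =====
def get_au_indices_alt (columns : List String) : List Int × List String :=
  -- single pass: bucket (meta_idx, meta_names) and (au_idx, au_names)
  let st := (PySem.List.enumerate columns).foldl
    (fun (s : (List Int × List String) × (List Int × List String)) p =>
      if p.2 == "frame" || p.2 == "timestamp" then
        ((s.1.1 ++ [p.1], s.1.2 ++ [p.2]), s.2)
      else if PySem.Str.startswith p.2 "AU" && PySem.Str.endswith p.2 "_r" then
        (s.1, (s.2.1 ++ [p.1], s.2.2 ++ [p.2]))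
      else s)
    (([], []), ([], []))
  (st.1.1 ++ st.2.1, st.1.2 ++ st.2.2)

-- ===== PRECONDITION & SPEC =====
def Spec_get_au_indices (columns : List String) (out : List Int × List String) : Prop := out = get_au_indices_alt columns
instance (columns : List String) (out : List Int × List String) : Decidable (Spec_get_au_indices columns out) := by unfold Spec_get_au_indices; infer_instance

-- ===== CLAIM (what is proved, stated in full; the proofs are below) =====
def Claim_equal_get_au_indices : Prop := ∀ (columns : List String), Dom_get_au_indices columns → Spec_get_au_indices columns (get_au_indices columns)

-- ===== LEMMAS AND PROOFS =====

-- A's single-predicate accumulating loop computes append of the filtered projections.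
theorem pv_foldl_sel (sel : Int × String → Bool) :
    ∀ (l : List (Int × String)) (acc : List Int × List String),
      l.foldl (fun (acc : List Int × List String) p =>
        if sel p then (acc.1 ++ [p.1], acc.2 ++ [p.2]) else acc) acc
      = (acc.1 ++ (l.filter sel).map Prod.fst, acc.2 ++ (l.filter sel).map Prod.snd) := by
  intro l
  induction l with
  | nil => intro acc; simp
  | cons p t ih =>
    intro acc
    by_cases h : sel p = true <;> simp [h, ih]

-- B's bucketing loop computes the two filters (the second under ¬ first).
theorem pv_foldl_part (s1 s2 : Int × String → Bool) :
    ∀ (l : List (Int × String)) (st : (List Int × List String) × (List Int × List String)),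
      l.foldl (fun (s : (List Int × List String) × (List Int × List String)) p =>
        if s1 p then ((s.1.1 ++ [p.1], s.1.2 ++ [p.2]), s.2)
        else if s2 p then (s.1, (s.2.1 ++ [p.1], s.2.2 ++ [p.2]))
        else s) st
      = ((st.1.1 ++ (l.filter s1).map Prod.fst, st.1.2 ++ (l.filter s1).map Prod.snd),
         (st.2.1 ++ (l.filter (fun p => !s1 p && s2 p)).map Prod.fst,
          st.2.2 ++ (l.filter (fun p => !s1 p && s2 p)).map Prod.snd)) := by
  intro l
  induction l with
  | nil => intro st; simp
  | cons p t ih =>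
    intro st
    by_cases h1 : s1 p = true
    · simp [h1, ih]
    · by_cases h2 : s2 p = true <;> simp [h1, h2, ih]
-- exclusivity: a 'frame'/'timestamp' column never starts with 'AU'
theorem pv_excl (p : Int × String) (h : (p.2 == "frame" || p.2 == "timestamp") = true) :
    (PySem.Str.startswith p.2 "AU" && PySem.Str.endswith p.2 "_r") = false := by
  rcases Bool.or_eq_true_iff.mp h with h' | h' <;>
    · have heq := eq_of_beq h'
      rw [heq]
      decide

theorem pv_and_not (p : Int × String) :
    (!(p.2 == "frame" || p.2 == "timestamp")
      && (PySem.Str.startswith p.2 "AU" && PySem.Str.endswith p.2 "_r"))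
    = (PySem.Str.startswith p.2 "AU" && PySem.Str.endswith p.2 "_r") := by
  by_cases h : (p.2 == "frame" || p.2 == "timestamp") = true
  · rw [h, pv_excl p h]; decide
  · have h' : (p.2 == "frame" || p.2 == "timestamp") = false := by simpa using h
    rw [h']
    simp

-- ===== VERDICT (by name: the statement is the Claim_ definition above) =====
theorem get_au_indices_spec : Claim_equal_get_au_indices := by
  intro columns _
  unfold Spec_get_au_indices get_au_indices get_au_indices_alt
  simp only [pv_foldl_sel, pv_foldl_part]
  have hf : (PySem.List.enumerate columns).filter
      (fun p => !(p.2 == "frame" || p.2 == "timestamp")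
        && (PySem.Str.startswith p.2 "AU" && PySem.Str.endswith p.2 "_r"))
      = (PySem.List.enumerate columns).filter
        (fun p => PySem.Str.startswith p.2 "AU" && PySem.Str.endswith p.2 "_r") := by
    apply List.filter_congr
    intro p _
    exact pv_and_not p
  rw [hf]
  simp
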